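-- pv_equiv track=rewrite | github.com/adriano-uff/ProbEst | distribuicoes.py | frequencia_acumulada_absoluta
-- ===== SOURCE A (Python) =====
-- def frequencia_acumulada_absoluta(valores,intervalos):
--
--     lista_freq_absoluta = []
--
--     for i in range(len(intervalos)):
--         freq = 0
--         for x in valores:
--             if x < intervalos[i][1]:
--                 freq += 1
--         lista_freq_absoluta.append(freq)
--
--     return lista_freq_absoluta
-- ===== SOURCE B (Python) =====
-- def frequencia_acumulada_absoluta(valores, intervalos):
--     vs = sorted(valores)
--
--     def bl(x):
--         # index of the first element of vs that is >= x (hand-written bisect_left)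
--         lo, hi = 0, len(vs)
--         while lo < hi:
--             mid = (lo + hi) // 2
--             if vs[mid] < x:
--                 lo = mid + 1
--             else:
--                 hi = mid
--         return lo
--
--     return [bl(iv[1]) for iv in intervalos]
-- ===== Notes on version B (the rewrite author's own statement) =====
-- stated objective: faster
-- what changed: sort the values once and binary-search each interval's upper bound instead of rescanning all values for every interval
-- outside the precondition, e.g. on frequencia_acumulada_absoluta([], [(0,)]): A returns [0], B raises IndexError
import Mathlib
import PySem

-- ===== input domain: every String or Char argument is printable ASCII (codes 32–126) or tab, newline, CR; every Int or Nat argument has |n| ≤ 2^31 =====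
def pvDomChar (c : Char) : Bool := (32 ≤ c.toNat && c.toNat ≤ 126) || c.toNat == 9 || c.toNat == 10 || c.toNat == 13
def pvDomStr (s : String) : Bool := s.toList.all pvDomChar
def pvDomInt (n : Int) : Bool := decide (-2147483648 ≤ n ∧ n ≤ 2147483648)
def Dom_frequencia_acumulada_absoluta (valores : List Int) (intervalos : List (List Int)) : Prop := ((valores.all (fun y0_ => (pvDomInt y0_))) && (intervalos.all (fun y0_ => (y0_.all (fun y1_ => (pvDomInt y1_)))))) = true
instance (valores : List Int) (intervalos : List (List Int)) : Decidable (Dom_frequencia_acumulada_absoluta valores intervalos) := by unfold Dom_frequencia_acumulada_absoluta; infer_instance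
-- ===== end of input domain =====

-- B sorts the values once and binary-searches each interval's upper bound instead of
-- rescanning all values per interval (objective: faster).

-- ===== PORT A =====
-- for i in range(len(intervalos)): freq = 0; for x in valores: if x < intervalos[i][1]: freq += 1; append
-- (intervalos[i][1] is in range under Pre_, so pyGetD's default is never used)
def frequencia_acumulada_absoluta (valores : List Int) (intervalos : List (List Int)) : List Int :=
  (PySem.List.pyRange 0 (intervalos.length : Int) 1).foldl
    (fun acc i =>
      acc ++ [valores.foldl
        (fun freq x =>
          if x < PySem.List.pyGetD (PySem.List.pyGetD intervalos i []) 1 0 then freq + 1 else freq)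
        (0 : Int)])
    []

-- ===== PORT B =====
-- hand-written bisect_left loop: while lo < hi: mid = (lo+hi)//2; if vs[mid] < x: lo = mid+1 else hi = mid
-- (mid is always in range when lo < hi ≤ len vs, so getD's default is never used)
-- fuel = len vs bounds the iteration count (hi - lo shrinks each step); it only guards totality
def pvBl (vs : List Int) (x : Int) : Nat → Nat → Nat → Nat
  | 0, lo, _ => lo
  | fuel + 1, lo, hi =>
    if lo < hi then
      if vs.getD ((lo + hi) / 2) 0 < x then pvBl vs x fuel ((lo + hi) / 2 + 1) hi
      else pvBl vs x fuel lo ((lo + hi) / 2)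
    else lo

def frequencia_acumulada_absoluta_alt (valores : List Int) (intervalos : List (List Int)) : List Int :=
  let vs := PySem.List.sorted valores (fun x => x) false
  intervalos.map (fun iv => (pvBl vs (PySem.List.pyGetD iv 1 0) vs.length 0 vs.length : Int))

-- ===== PRECONDITION & SPEC =====
-- Pre_ excludes intervals with fewer than two elements: B always raises IndexError at iv[1] there, and so
-- does A whenever valores is non-empty; with valores empty A returns 0-counts since it never reads the bound.
def Pre_frequencia_acumulada_absoluta (valores : List Int) (intervalos : List (List Int)) : Prop :=
  ∀ iv ∈ intervalos, 2 ≤ iv.length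
instance (valores : List Int) (intervalos : List (List Int)) : Decidable (Pre_frequencia_acumulada_absoluta valores intervalos) := by unfold Pre_frequencia_acumulada_absoluta; infer_instance

def pvWitness_frequencia_acumulada_absoluta : List Int × List (List Int) :=
  ([3, 1, 2], [[0, 2], [2, 4]])

def Spec_frequencia_acumulada_absoluta (valores : List Int) (intervalos : List (List Int)) (out : List Int) : Prop := out = frequencia_acumulada_absoluta_alt valores intervalos
instance (valores : List Int) (intervalos : List (List Int)) (out : List Int) : Decidable (Spec_frequencia_acumulada_absoluta valores intervalos out) := by unfold Spec_frequencia_acumulada_absoluta; infer_instance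

-- ===== CLAIM (what is proved, stated in full; the proofs are below) =====
def Claim_equal_frequencia_acumulada_absoluta : Prop := ∀ (valores : List Int) (intervalos : List (List Int)), Dom_frequencia_acumulada_absoluta valores intervalos → Pre_frequencia_acumulada_absoluta valores intervalos → Spec_frequencia_acumulada_absoluta valores intervalos (frequencia_acumulada_absoluta valores intervalos)

-- ===== LEMMAS AND PROOFS =====

-- counting fold of A = countP
theorem pvFoldlCount (b : Int) (v : List Int) (init : Int) :
    v.foldl (fun freq x => if x < b then freq + 1 else freq) init
      = init + (v.countP (fun x => decide (x < b)) : Int) := by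
  induction v generalizing init with
  | nil => simp
  | cons y t ih =>
    simp only [List.foldl_cons, List.countP_cons, ih]
    by_cases h : y < b
    · simp only [if_pos h, decide_eq_true h, cond_true]
      push_cast; ring
    · simp [h]

-- on a list split at index k by the predicate, countP = k
theorem pvCountPBoundary (x : Int) :
    ∀ (a : List Int) (k : Nat), k ≤ a.length →
    (∀ j (h : j < a.length), j < k → a[j] < x) →
    (∀ j (h : j < a.length), k ≤ j → ¬ a[j] < x) →
    a.countP (fun y => decide (y < x)) = k := by
  intro a
  induction a with
  | nil => intro k hk _ _; have hk0 : k = 0 := by simpa using hk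
           simp [hk0]
  | cons y t ih =>
    intro k hk hlt hge
    cases k with
    | zero =>
      have h0 : ¬ y < x := by simpa using hge 0 (by simp) (by omega)
      have ht : t.countP (fun y => decide (y < x)) = 0 := by
        apply ih 0 (by omega)
        · intro j hj hj0; omega
        · intro j hj _
          simpa using hge (j+1) (by simpa using Nat.succ_lt_succ hj) (by omega)
      simp [h0, ht]
    | succ k' =>
      have hy : y < x := by simpa using hlt 0 (by simp) (by omega)
      have ht : t.countP (fun y => decide (y < x)) = k' := by
        apply ih k' (by simpa using hk)
        · intro j hj hjk
          simpa using hlt (j+1) (by simpa using Nat.succ_lt_succ hj) (by omega)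
        · intro j hj hjk
          simpa using hge (j+1) (by simpa using Nat.succ_lt_succ hj) (by omega)
      simp [hy, ht]

-- invariant of the binary-search loop on a sorted list
theorem pvBlInv (a : List Int) (x : Int) (hs : a.Pairwise (· ≤ ·)) :
    ∀ (fuel lo hi : Nat), hi - lo ≤ fuel → lo ≤ hi → hi ≤ a.length →
    (∀ j (h : j < a.length), j < lo → a[j] < x) →
    (∀ j (h : j < a.length), hi ≤ j → ¬ a[j] < x) →
    pvBl a x fuel lo hi = a.countP (fun y => decide (y < x)) := by
  have hmono : ∀ i j (hi' : i < a.length) (hj' : j < a.length), i ≤ j → a[i] ≤ a[j] := by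
    intro i j hi' hj' hij
    rcases Nat.lt_or_ge i j with h | h
    · exact (List.pairwise_iff_getElem.mp hs) i j hi' hj' h
    · have : i = j := by omega
      subst this; exact le_refl _
  intro fuel
  induction fuel with
  | zero =>
    intro lo hi hf hlh hha hlt hge
    have : lo = hi := by omega
    subst this
    simp only [pvBl]
    exact (pvCountPBoundary x a lo hha hlt (fun j h hj => hge j h hj)).symm
  | succ n ih =>
    intro lo hi hf hlh hha hlt hge
    simp only [pvBl]
    by_cases hlohi : lo < hi
    · have hmid : (lo + hi) / 2 < a.length := by omega
      have hmidlo : lo ≤ (lo + hi) / 2 := by omega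
      have hmidhi : (lo + hi) / 2 < hi := by omega
      rw [if_pos hlohi, List.getD_eq_getElem a 0 hmid]
      by_cases hcmp : a[(lo + hi) / 2] < x
      · rw [if_pos hcmp]
        apply ih ((lo + hi) / 2 + 1) hi (by omega) (by omega) hha
        · intro j h hj
          have : a[j] ≤ a[(lo + hi) / 2] := hmono j _ h hmid (by omega)
          omega
        · exact hge
      · rw [if_neg hcmp]
        apply ih lo ((lo + hi) / 2) (by omega) (by omega) (by omega) hlt
        · intro j h hj
          have : a[(lo + hi) / 2] ≤ a[j] := hmono _ j hmid h hj
          omega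
    · rw [if_neg hlohi]
      have : lo = hi := by omega
      subst this
      exact (pvCountPBoundary x a lo hha hlt (fun j h hj => hge j h hj)).symm

-- full binary search computes countP on the sorted list
theorem pvBlCount (a : List Int) (x : Int) (hs : a.Pairwise (· ≤ ·)) :
    pvBl a x a.length 0 a.length = a.countP (fun y => decide (y < x)) :=
  pvBlInv a x hs a.length 0 a.length (by omega) (by omega) (le_refl _)
    (fun j _ hj => absurd hj (by omega)) (fun j h hj => absurd h (by omega))

-- ===== VERDICT (by name: the statement is the Claim_ definition above) =====
theorem frequencia_acumulada_absoluta_spec : Claim_equal_frequencia_acumulada_absoluta := by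
  intro valores intervalos _ _
  unfold Spec_frequencia_acumulada_absoluta frequencia_acumulada_absoluta frequencia_acumulada_absoluta_alt
  rw [PySem.List.foldl_pyRange_zero_pyGetD' intervalos ([] : List Int)
        (fun acc iv => acc ++ [valores.foldl
          (fun freq x => if x < PySem.List.pyGetD iv 1 0 then freq + 1 else freq) (0 : Int)]) []]
  rw [PySem.List.foldl_append_singleton_eq_map]
  apply List.map_congr_left
  intro iv _
  set b := PySem.List.pyGetD iv 1 0 with hb
  set vs := PySem.List.sorted valores (fun x => x) false with hvs
  have hperm : vs.Perm valores := PySem.List.sorted_perm valores (fun x => x) false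
  have hsorted : vs.Pairwise (· ≤ ·) := PySem.List.sorted_pairwise valores (fun x => x)
  rw [pvFoldlCount b valores 0, pvBlCount vs b hsorted, hperm.countP_eq]
  simp
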